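/- GENERATED by mk_final_copies.py from the proof of the farm's unit `inverse_mdct.11` (farm:inverse_mdct.11.1: Proof.lean) as the
   re-elaboration sweep compiled it — do not edit. -/
import Asan.CheckWalk
import Vorbis.Spec.MdctUse
import Vorbis.Spec.Units.inverse_mdct_11
import Vorbis.Spec.Worked.inverse_mdct_11_Lemmas

open X86 X86.User Asan Vorbis Vorbis.Spec

set_option maxRecDepth 4000
set_option maxHeartbeats 4000000

namespace Vorbis.Spec.inverse_mdct_11

/-- **The second half** (`chk93` = 0x10a05c … `loop10` = 0x10a164, lines 2937–2950): four loads of `e[0] B[1] e[1] B[0]`, four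
stores `d0[3] d1[0] d2[3] d3[0]`, eight checks, then the six pointer steps (`d0` is incremented IN MEMORY, `q[rbp − 38H]`): to the
head of the step-8 loop with `t + 1`. The walk is cut after every check call, as in `first_half`. -/
theorem second_half {Lay : Layout} (hLay : Lay.hi = 0x1000000) {μ : Microarch} (hμ : UserX.MicroOK μ) {u₀ : State}
    (hcode : HasCodeNat Lay u₀ Vorbis.L.inverse_mdct.entry Vorbis.Code.code_inverse_mdct.nat Vorbis.L.inverse_mdct.size)
    (hload4 : Asan.SmallCheck Lay μ Vorbis.WayInv (Vorbis.CodeOK u₀) [.rax, .rcx, .rdx] 4 Vorbis.L.__asan_load4_noabort.entry)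
    (hstore4 : Asan.SmallCheck Lay μ Vorbis.WayInv (Vorbis.CodeOK u₀) [.rax, .rcx, .rdx] 4 Vorbis.L.__asan_store4_noabort.entry)
    {others : List Obj} {frames : List (Nat × FrameLayout)} {len : Nat} {A : Arena} {stored room : Int} {ysz : Nat → Nat}
    {k c : Nat} {ue : State} {ret : Word} {t : Nat} {v : State}
    (hat : AtHalf u₀ others frames len A stored room ysz k c ue ret t v) :
    ReachVia Lay μ WayInv v (fun w => inverse_mdct.AtS8Head u₀ others frames len A stored room ysz k c ue ret (t + 1) w) := by
  obtain ⟨hrip, hl, hlt, c_rdi⟩ := hat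
  have hb := hl.body
  have he := hb.entry
  v_entry he
  have har := arrays hb
  have hnf := har.nf
  have hbu := har.loU
  have hcu := har.hiU
  have hou := har.offU
  have hbv := har.loV
  have hcv := har.hiV
  have hbB := har.loB
  have hcB := har.hiB
  -- the present state under the names the walker reads
  have w_rip := hrip
  have c_rsp := hb.rsp
  have c_rbp := hb.rbp
  have w_eq : Mem.EqOn Vorbis.L.textLo Vorbis.L.textHi u₀.mem v.mem := hb.code
  have hdf : v.flags .df = false := (show abiInv _ from hb.abi).1
  have hmx : v.mxcsr &&& 0x1F80 = 0x1F80 := (show abiInv _ from hb.abi).2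
  have hsse := Vorbis.sseOK_of_abiInv hb.abi
  have sd0 := hl.d0Slot
  have hrbx := hl.rbx
  have hr12 := hl.r12
  have hr13 := hl.r13
  have hr14 := hl.r14
  have hr15 := hl.r15
  u_walk hcode [hμ.vendor] until [Vorbis.L.inverse_mdct.ret104] span [Vorbis.L.textLo, Vorbis.L.textHi] side (v_side)
  case check_10a05c =>
    have hun : ShadowUntouched v.mem s_10a05c.mem := by v_untouched
    exact har.liveV.accSmall hb.shadow hun _ 4 (by decide) (by u_omega) (by u_omega)
  try clear w_zmm
  u_walk hcode [hμ.vendor] until [Vorbis.L.inverse_mdct.ret105] span [Vorbis.L.textLo, Vorbis.L.textHi] side (v_side)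
  case check_10a06f =>
    have hun : ShadowUntouched v.mem s_10a06f.mem := by v_untouched
    exact har.liveB.accSmall hb.shadow hun _ 4 (by decide) (by u_omega) (by u_omega)
  try clear w_zmm
  u_walk hcode [hμ.vendor] until [Vorbis.L.inverse_mdct.ret106] span [Vorbis.L.textLo, Vorbis.L.textHi] side (v_side)
  case check_10a092 =>
    have hun : ShadowUntouched v.mem s_10a092.mem := by v_untouched
    exact har.liveV.accSmall hb.shadow hun _ 4 (by decide) (by u_omega) (by u_omega)
  try clear w_zmm
  u_walk hcode [hμ.vendor] until [Vorbis.L.inverse_mdct.ret107] span [Vorbis.L.textLo, Vorbis.L.textHi] side (v_side)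
  case check_10a0a4 =>
    have hun : ShadowUntouched v.mem s_10a0a4.mem := by v_untouched
    exact har.liveB.accSmall hb.shadow hun _ 4 (by decide) (by u_omega) (by u_omega)
  try clear w_zmm
  u_walk hcode [hμ.vendor] until [Vorbis.L.inverse_mdct.ret108] span [Vorbis.L.textLo, Vorbis.L.textHi] side (v_side)
  case check_10a0f3 =>
    have hun : ShadowUntouched v.mem s_10a0f3.mem := by v_untouched
    exact har.liveU.accSmall hb.shadow hun _ 4 (by decide) (by u_omega) (by u_omega)
  try clear w_zmm
  u_walk hcode [hμ.vendor] until [Vorbis.L.inverse_mdct.ret109] span [Vorbis.L.textLo, Vorbis.L.textHi] side (v_side)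
  case check_10a115 =>
    have hun : ShadowUntouched v.mem s_10a115.mem := by v_untouched
    exact har.liveU.accSmall hb.shadow hun _ 4 (by decide) (by u_omega) (by u_omega)
  try clear w_zmm
  u_walk hcode [hμ.vendor] until [Vorbis.L.inverse_mdct.ret110] span [Vorbis.L.textLo, Vorbis.L.textHi] side (v_side)
  case check_10a129 =>
    have hun : ShadowUntouched v.mem s_10a129.mem := by v_untouched
    exact har.liveU.accSmall hb.shadow hun _ 4 (by decide) (by u_omega) (by u_omega)
  try clear w_zmm
  u_walk hcode [hμ.vendor] until [Vorbis.L.inverse_mdct.ret111] span [Vorbis.L.textLo, Vorbis.L.textHi] side (v_side)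
  case check_10a13c =>
    have hun : ShadowUntouched v.mem s_10a13c.mem := by v_untouched
    exact har.liveU.accSmall hb.shadow hun _ 4 (by decide) (by u_omega) (by u_omega)
  try clear w_zmm
  u_walk hcode [hμ.vendor] until [Vorbis.L.inverse_mdct.loop10] span [Vorbis.L.textLo, Vorbis.L.textHi] side (v_side)
  -- 0x10a164: the exit assertion, the invariant of the loop with `t + 1`
  have hst : Mem.SameExcept [⟨(ue.reg .rsp).toNat - 192, (ue.reg .rsp).toNat - 184⟩,
      ⟨(ue.reg .rsp).toNat - 96, (ue.reg .rsp).toNat - 84⟩, ⟨(ue.reg .rsp).toNat - 76, (ue.reg .rsp).toNat - 68⟩,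
      ⟨(ue.reg .rsp).toNat - 64, (ue.reg .rsp).toNat - 64 + 8⟩,
      ⟨inverse_mdct.buf ue, inverse_mdct.buf ue + 4 * inverse_mdct.n ue⟩] v.mem s_10a160.mem := by
    u_same
  have habi : abiInv s_10a160 := by v_inv
  have hrbp' : s_10a160.reg .rbp = ue.reg .rsp - 8 := by
    rw [w_kept .rbp rfl]
    exact c_rbp
  obtain ⟨hbody, _⟩ := carry_tight hb (Nat.le_refl 8) hst w_eq habi hrbp' w_rsp
  refine ReachVia.done ⟨w_rip, hbody, ?_, ?_, ?_, ?_, ?_, ?_, ?_⟩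
  · -- `t + 1 ≤ n16`
    omega
  · -- `e -= 8`
    rw [w_rbx]
    u_omega
  · -- `B -= 8`
    rw [w_r12]
    u_omega
  · -- `d0 += 4`, in memory
    u_resolve
    simp only [BitVec.toNat_add, BitVec.toNat_ofNat]
    omega
  · -- `d1 -= 4`
    rw [w_r13]
    u_omega
  · -- `d2 += 4`
    rw [w_r15]
    u_omega
  · -- `d3 -= 4`
    rw [w_r14]
    u_omega

end Vorbis.Spec.inverse_mdct_11

/-- Segment 11 of `inverse_mdct` (`cut23` … `loop10`: the second half of the step-8 body, 16 checks, the six pointer steps): the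
two halves `first_half` (Lemmas.lean) and `second_half`, composed at the check call `chk93`. -/
theorem Vorbis.Spec.Worked.inverse_mdct_11_ok : Vorbis.Spec.inverse_mdct_11.Statement := by
  intro Lay hLay μ hμ u₀ hcode hload4 hstore4 others frames len A stored room ysz k c ue ret t v hat
  refine ReachVia.trans (Vorbis.Spec.inverse_mdct_11.first_half hLay hμ hcode hload4 hstore4 hat) ?_
  intro w hw
  exact Vorbis.Spec.inverse_mdct_11.second_half hLay hμ hcode hload4 hstore4 hw
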